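-- pv_equiv track=rewrite | github.com/jlfzzz/algorithms | others/3600-3700/3602. 十六进制和三十六进制转化.py | concatHex36
-- ===== SOURCE A (Python) =====
-- str1 = "0123456789ABCDEF"
--
-- str2 = "0123456789ABCDEFGHIJKLMNOPQRSTUVWXYZ"
--
-- def concatHex36(n: int) -> str:
--     t = n * n
--     s1, s2 = "", ""
--     while t > 0:
--         s1 += str1[t % 16]
--         t //= 16
--     t = n * n * n
--     while t > 0:
--         s2 += str2[t % 36]
--         t //= 36
--     s1 = s1[::-1]
--     s2 = s2[::-1]
--     return s1 + s2
-- ===== SOURCE B (Python) =====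
-- str1 = "0123456789ABCDEF"
--
-- str2 = "0123456789ABCDEFGHIJKLMNOPQRSTUVWXYZ"
--
-- def conv(t, digits, base):
--     if t <= 0:
--         return ""
--     return conv(t // base, digits, base) + digits[t % base]
--
-- def concatHex36(n: int) -> str:
--     return conv(n * n, str1, 16) + conv(n * n * n, str2, 36)
-- ===== Notes on version B (the rewrite author's own statement) =====
-- stated objective: simpler
-- what changed: Replaces the two while-loops that accumulate digits least-significant-first and then reverse with a single recursive helper conv(t, digits, base) that emits digits most-significant-first, so no reversal or per-base loop is needed.
import Mathlib
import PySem

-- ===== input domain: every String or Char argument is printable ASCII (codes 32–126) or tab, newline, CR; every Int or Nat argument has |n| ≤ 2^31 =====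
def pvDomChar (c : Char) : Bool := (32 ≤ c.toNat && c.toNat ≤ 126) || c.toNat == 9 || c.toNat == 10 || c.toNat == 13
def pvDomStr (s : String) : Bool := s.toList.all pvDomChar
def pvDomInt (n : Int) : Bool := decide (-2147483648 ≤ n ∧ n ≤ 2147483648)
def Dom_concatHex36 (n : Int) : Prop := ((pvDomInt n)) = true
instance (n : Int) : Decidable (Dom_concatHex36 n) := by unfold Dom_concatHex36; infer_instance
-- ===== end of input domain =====

-- B replaces A's two reverse-then-concatenate while-loops by one recursive helper that
-- emits digits most-significant-first (objective: simpler; same asymptotic cost).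

-- termination helper used by both ports' recursions
theorem pv_floordiv_toNat_lt (t base : Int) (ht : 0 < t) (hb : 1 < base) :
    (PySem.Int.floordiv t base).toNat < t.toNat := by
  rw [PySem.Int.floordiv_eq_ediv_of_pos (by omega)]
  have h1 : t / base < t := by
    rw [Int.ediv_lt_iff_lt_mul (by omega)]; nlinarith
  have h2 : 0 ≤ t / base := Int.ediv_nonneg (by omega) (by omega)
  omega

-- ===== PORT A =====
def pvDigits16 : List Char := "0123456789ABCDEF".toList
def pvDigits36 : List Char := "0123456789ABCDEFGHIJKLMNOPQRSTUVWXYZ".toList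

-- A's while loop: 'while t > 0: s += digits[t % base]; t //= base' (indexing via pyGetD: the
-- index 't % base' is always in range since 0 < base ≤ len digits at both call sites)
def pvLoopA (digits : List Char) (base : Int) (hb : 1 < base) (t : Int) (s : List Char) : List Char :=
  if 0 < t then
    pvLoopA digits base hb (PySem.Int.floordiv t base)
      (s ++ [PySem.List.pyGetD digits (PySem.Int.mod t base) ' '])
  else s
termination_by t.toNat
decreasing_by exact pv_floordiv_toNat_lt _ _ (by omega) hb

def concatHex36 (n : Int) : String :=
  let s1 := pvLoopA pvDigits16 16 (by norm_num) (n * n) []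
  let s2 := pvLoopA pvDigits36 36 (by norm_num) (n * n * n) []
  -- s1[::-1], s2[::-1] are list reversal (PySem.Str.slice?_none_none_neg_one); '+' on the list side
  String.ofList (s1.reverse ++ s2.reverse)

-- ===== PORT B =====
-- Source B's conv(t, digits, base): '' if t <= 0 else conv(t // base, digits, base) + digits[t % base]
def pvConv (t : Int) (digits : List Char) (base : Int) (hb : 1 < base) : List Char :=
  if t ≤ 0 then []
  else pvConv (PySem.Int.floordiv t base) digits base hb
        ++ [PySem.List.pyGetD digits (PySem.Int.mod t base) ' ']
termination_by t.toNat
decreasing_by exact pv_floordiv_toNat_lt _ _ (by omega) hb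

def concatHex36_alt (n : Int) : String :=
  String.ofList (pvConv (n * n) pvDigits16 16 (by norm_num)
    ++ pvConv (n * n * n) pvDigits36 36 (by norm_num))

-- ===== PRECONDITION & SPEC =====
def Spec_concatHex36 (n : Int) (out : String) : Prop := out = concatHex36_alt n
instance (n : Int) (out : String) : Decidable (Spec_concatHex36 n out) := by unfold Spec_concatHex36; infer_instance

-- ===== CLAIM (what is proved, stated in full; the proofs are below) =====
def Claim_equal_concatHex36 : Prop := ∀ (n : Int), Dom_concatHex36 n → Spec_concatHex36 n (concatHex36 n)

-- ===== LEMMAS AND PROOFS =====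
-- A's loop result is the accumulator followed by B's digit string reversed.
theorem pvLoopA_eq_conv_reverse (digits : List Char) (base : Int) (hb : 1 < base) :
    ∀ (k : Nat) (t : Int), t.toNat ≤ k → ∀ s : List Char,
      pvLoopA digits base hb t s = s ++ (pvConv t digits base hb).reverse := by
  intro k
  induction k with
  | zero =>
    intro t hk s
    rw [pvLoopA, pvConv, if_neg (by omega : ¬ 0 < t), if_pos (by omega : t ≤ 0)]
    simp
  | succ k ih =>
    intro t hk s
    rw [pvLoopA, pvConv]
    by_cases h : 0 < t
    · rw [if_pos h, if_neg (by omega : ¬ t ≤ 0),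
        ih _ (by have := pv_floordiv_toNat_lt t base h hb; omega) _]
      simp
    · rw [if_neg h, if_pos (by omega : t ≤ 0)]; simp

-- ===== VERDICT (by name: the statement is the Claim_ definition above) =====
theorem concatHex36_spec : Claim_equal_concatHex36 := by
  intro n _
  unfold Spec_concatHex36 concatHex36 concatHex36_alt
  rw [pvLoopA_eq_conv_reverse _ _ _ _ _ le_rfl, pvLoopA_eq_conv_reverse _ _ _ _ _ le_rfl]
  simp
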